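-- pv_equiv track=rewrite | github.com/wwch123/AI_rewriter | content_rewriter.py | _contains_formula
-- ===== SOURCE A (Python) =====
-- def _contains_formula(text: str) -> bool:
--     """检查文本中是否包含公式标记"""
--     # LaTeX公式标记
--     latex_markers = ['\\begin{equation}', '\\end{equation}', '\\begin{align}', '\\end{align}',
--                      '$', '\\frac', '\\sum', '\\int', '\\alpha', '\\beta', '\\gamma']
--
--     # Office数学公式可能包含的XML标记
--     office_markers = ['<m:oMath', '<m:r>', '<m:t>', '<m:f>', '<m:num>', '<m:den>']
--
--     # 检查是否包含任何公式标记
--     for marker in latex_markers + office_markers: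
--         if marker in text:
--             return True
--
--     return False
-- ===== SOURCE B (Python) =====
-- # Dispatch-on-first-character scan: markers are grouped by their first character
-- # ('$', '\\', '<'); one sweep over the text consults only the group for the
-- # current character instead of scanning the whole text once per marker.
-- _BACKSLASH_TAILS = ('begin{equation}', 'end{equation}', 'begin{align}', 'end{align}',
--                     'frac', 'sum', 'int', 'alpha', 'beta', 'gamma')
-- _ANGLE_TAILS = ('m:oMath', 'm:r>', 'm:t>', 'm:f>', 'm:num>', 'm:den>')
--
--
-- def _contains_formula(text: str) -> bool:
--     i = 0
--     n = len(text)
--     while i < n: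
--         ch = text[i]
--         if ch == '$':
--             return True
--         if ch == '\\' and any(text.startswith(t, i + 1) for t in _BACKSLASH_TAILS):
--             return True
--         if ch == '<' and any(text.startswith(t, i + 1) for t in _ANGLE_TAILS):
--             return True
--         i += 1
--     return False
-- ===== Notes on version B (the rewrite author's own statement) =====
-- stated objective: alternative
-- what changed: A scans the whole text once per marker (17 separate substring scans); B makes one sweep over the text dispatching on the current character ('$', '\', '<') and only then matches the tails of the markers grouped under that first character.
import Mathlib
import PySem

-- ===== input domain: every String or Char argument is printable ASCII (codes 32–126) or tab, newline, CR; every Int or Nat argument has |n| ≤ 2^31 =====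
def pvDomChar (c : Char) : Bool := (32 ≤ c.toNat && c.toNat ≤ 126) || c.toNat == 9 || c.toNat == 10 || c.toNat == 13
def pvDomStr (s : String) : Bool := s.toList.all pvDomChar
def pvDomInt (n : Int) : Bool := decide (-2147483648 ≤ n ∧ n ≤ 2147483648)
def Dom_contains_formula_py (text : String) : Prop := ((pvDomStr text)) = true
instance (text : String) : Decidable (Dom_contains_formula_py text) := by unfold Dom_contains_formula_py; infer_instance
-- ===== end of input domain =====

-- B replaces A's one-full-substring-scan-per-marker loop by one sweep that dispatches on the
-- current character ('$', '\\', '<') and matches only the marker tails grouped under it.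

-- ===== PORT A =====
def pvLatexMarkers : List (List Char) :=
  ["\\begin{equation}".toList, "\\end{equation}".toList, "\\begin{align}".toList,
   "\\end{align}".toList, "$".toList, "\\frac".toList, "\\sum".toList, "\\int".toList,
   "\\alpha".toList, "\\beta".toList, "\\gamma".toList]

def pvOfficeMarkers : List (List Char) :=
  ["<m:oMath".toList, "<m:r>".toList, "<m:t>".toList, "<m:f>".toList,
   "<m:num>".toList, "<m:den>".toList]

-- 'for marker in latex + office: if marker in text: return True' ⇒ List.any of 'marker in text'
def contains_formula_py (text : String) : Bool :=
  (pvLatexMarkers ++ pvOfficeMarkers).any (fun m => PySem.Chars.isIn m text.toList)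

-- ===== PORT B =====
-- marker tails grouped by first character, as in Source B
def pvBackslashTails : List (List Char) :=
  ["begin{equation}".toList, "end{equation}".toList, "begin{align}".toList,
   "end{align}".toList, "frac".toList, "sum".toList, "int".toList,
   "alpha".toList, "beta".toList, "gamma".toList]

def pvAngleTails : List (List Char) :=
  ["m:oMath".toList, "m:r>".toList, "m:t>".toList, "m:f>".toList,
   "m:num>".toList, "m:den>".toList]

-- Source B's while-loop over positions: structural recursion on the remaining suffix,
-- dispatching on the current character
def pvDispatchScan : List Char → Bool
  | [] => false
  | c :: t =>
    if c = '$' then true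
    else if c = '\\' && pvBackslashTails.any (fun m => PySem.Chars.startswith t m) then true
    else if c = '<' && pvAngleTails.any (fun m => PySem.Chars.startswith t m) then true
    else pvDispatchScan t

def contains_formula_py_alt (text : String) : Bool :=
  pvDispatchScan text.toList

-- ===== PRECONDITION & SPEC =====
def Spec_contains_formula_py (text : String) (out : Bool) : Prop := out = contains_formula_py_alt text
instance (text : String) (out : Bool) : Decidable (Spec_contains_formula_py text out) := by unfold Spec_contains_formula_py; infer_instance

-- ===== CLAIM (what is proved, stated in full; the proofs are below) =====
def Claim_equal_contains_formula_py : Prop := ∀ (text : String), Dom_contains_formula_py text → Spec_contains_formula_py text (contains_formula_py text)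

-- ===== LEMMAS AND PROOFS =====

def pvAllMarkers : List (List Char) := pvLatexMarkers ++ pvOfficeMarkers

-- A's markers equal B's grouped markers (first char '$'/'\\'/'<' put back), as a multiset
def pvGrouped : List (List Char) :=
  [['$']] ++ pvBackslashTails.map (fun t => '\\' :: t) ++ pvAngleTails.map (fun t => '<' :: t)

theorem pvMarkers_perm : pvAllMarkers.Perm pvGrouped := by decide

-- some full marker is a prefix of c :: t ↔ B's per-position dispatch condition fires
theorem pvMarker_prefix_iff (c : Char) (t : List Char) :
    (∃ m ∈ pvAllMarkers, m <+: c :: t) ↔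
      (c = '$' ∨ (c = '\\' ∧ ∃ m ∈ pvBackslashTails, m <+: t)
               ∨ (c = '<' ∧ ∃ m ∈ pvAngleTails, m <+: t)) := by
  have hmem : ∀ m, m ∈ pvAllMarkers ↔ m ∈ pvGrouped := fun m => pvMarkers_perm.mem_iff
  constructor
  · rintro ⟨m, hm, hp⟩
    rw [hmem] at hm
    simp only [pvGrouped, List.mem_append, List.mem_cons, List.not_mem_nil, or_false,
      List.mem_map] at hm
    rcases hm with (rfl | ⟨a, ha, rfl⟩) | ⟨a, ha, rfl⟩ <;>
      rw [List.cons_prefix_cons] at hp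
    · exact Or.inl hp.1.symm
    · exact Or.inr (Or.inl ⟨hp.1.symm, a, ha, hp.2⟩)
    · exact Or.inr (Or.inr ⟨hp.1.symm, a, ha, hp.2⟩)
  · rintro (rfl | ⟨rfl, a, ha, hp⟩ | ⟨rfl, a, ha, hp⟩)
    · exact ⟨['$'], (hmem _).mpr (by simp [pvGrouped]), by simp [List.cons_prefix_cons]⟩
    · exact ⟨'\\' :: a, (hmem _).mpr (by simp [pvGrouped]; tauto),
        (List.cons_prefix_cons).mpr ⟨rfl, hp⟩⟩
    · exact ⟨'<' :: a, (hmem _).mpr (by simp [pvGrouped]; tauto),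
        (List.cons_prefix_cons).mpr ⟨rfl, hp⟩⟩

-- one step of the sweep, as a disjunction
theorem pvScan_cons (c : Char) (t : List Char) :
    pvDispatchScan (c :: t) = true ↔
      ((c = '$' ∨ (c = '\\' ∧ ∃ m ∈ pvBackslashTails, m <+: t)
                ∨ (c = '<' ∧ ∃ m ∈ pvAngleTails, m <+: t)) ∨ pvDispatchScan t = true) := by
  rw [pvDispatchScan]
  split_ifs with h1 h2 h3 <;>
    simp_all [Bool.and_eq_true, List.any_eq_true, PySem.Chars.startswith_iff]

-- the dispatch sweep finds exactly: some marker is a prefix of some suffix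
theorem pvDispatchScan_iff (cs : List Char) :
    pvDispatchScan cs = true ↔ ∃ m ∈ pvAllMarkers, ∃ j, m <+: cs.drop j := by
  induction cs with
  | nil =>
    simp only [pvDispatchScan, Bool.false_eq_true, false_iff]
    rintro ⟨m, hm, j, hp⟩
    rw [List.drop_nil, List.prefix_nil] at hp
    subst hp
    exact absurd hm (by decide)
  | cons c t ih =>
    rw [pvScan_cons, ih, ← pvMarker_prefix_iff]
    constructor
    · rintro (⟨m, hm, hp⟩ | ⟨m, hm, j, hp⟩)
      · exact ⟨m, hm, 0, by simpa using hp⟩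
      · exact ⟨m, hm, j + 1, by simpa using hp⟩
    · rintro ⟨m, hm, j, hp⟩
      match j with
      | 0 => exact Or.inl ⟨m, hm, by simpa using hp⟩
      | j + 1 => exact Or.inr ⟨m, hm, j, by simpa using hp⟩

-- ===== VERDICT (by name: the statement is the Claim_ definition above) =====
theorem contains_formula_py_spec : Claim_equal_contains_formula_py := by
  intro text _
  unfold Spec_contains_formula_py contains_formula_py contains_formula_py_alt
  rcases hb : pvDispatchScan text.toList with _ | _
  · rw [List.any_eq_false]
    intro m hm
    rw [Bool.not_eq_true, PySem.Chars.isIn_eq_false_iff]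
    intro hinf
    obtain ⟨j, hp⟩ := (PySem.Chars.exists_prefix_drop_iff_isIn m text.toList).mpr
      ((PySem.Chars.isIn_iff_infix m text.toList).mpr hinf)
    have : pvDispatchScan text.toList = true :=
      (pvDispatchScan_iff _).mpr ⟨m, by simpa [pvAllMarkers] using hm, j, hp⟩
    simp [this] at hb
  · obtain ⟨m, hm, j, hp⟩ := (pvDispatchScan_iff _).mp hb
    exact List.any_eq_true.mpr ⟨m, by simpa [pvAllMarkers] using hm,
      (PySem.Chars.exists_prefix_drop_iff_isIn m text.toList).mp ⟨j, hp⟩⟩
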